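-- pv_equiv track=rewrite | github.com/chvjak/cj2020 | cj2020/cj2020-4.py | solve
-- ===== SOURCE A (Python) =====
-- def solve(digits):
--     # make
--     str_res = ""
--     for prev_d, d in zip([0] + digits, digits + [0]):
--
--         if prev_d < d:
--             for i in range(prev_d, d):
--                 str_res += "("
--         else:
--             for i in range(d, prev_d):
--                 str_res += ")"
--         str_res += str(d)
--
--     return str_res[:-1]
-- ===== SOURCE B (Python) =====
-- def solve(digits):
--     # Divide-and-conquer on the nesting structure (explicit work stack, no
--     # consecutive-digit deltas): a maximal run of digits above the current
--     # depth is one parenthesized group rendered one level deeper; a run below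
--     # it is a ")…(" group rendered one level shallower.
--     work = [(digits, 0)]
--     out = []
--     while work:
--         top = work.pop()
--         if isinstance(top, str):
--             out.append(top)
--             continue
--         ds, depth = top
--         if not ds:
--             continue
--         if ds[0] == depth:
--             work.append((ds[1:], depth))
--             work.append(str(depth))
--         elif ds[0] > depth:
--             i = 0
--             while i < len(ds) and ds[i] > depth:
--                 i += 1
--             work.extend([(ds[i:], depth), ")", (ds[:i], depth + 1), "("])
--         else:
--             i = 0
--             while i < len(ds) and ds[i] < depth:
--                 i += 1
--             work.extend([(ds[i:], depth), "(", (ds[:i], depth - 1), ")"])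
--     return "".join(out)
-- ===== Notes on version B (the rewrite author's own statement) =====
-- stated objective: alternative
-- what changed: Replaces A's pass over consecutive digit pairs (sentinel zip, per-gap paren deltas, trailing trim) by a divide-and-conquer on the nesting structure: an explicit work stack splits off the maximal run of digits above (or below) the current depth, renders it as one parenthesized group one level deeper (or shallower), and joins the collected pieces once.
import Mathlib
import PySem

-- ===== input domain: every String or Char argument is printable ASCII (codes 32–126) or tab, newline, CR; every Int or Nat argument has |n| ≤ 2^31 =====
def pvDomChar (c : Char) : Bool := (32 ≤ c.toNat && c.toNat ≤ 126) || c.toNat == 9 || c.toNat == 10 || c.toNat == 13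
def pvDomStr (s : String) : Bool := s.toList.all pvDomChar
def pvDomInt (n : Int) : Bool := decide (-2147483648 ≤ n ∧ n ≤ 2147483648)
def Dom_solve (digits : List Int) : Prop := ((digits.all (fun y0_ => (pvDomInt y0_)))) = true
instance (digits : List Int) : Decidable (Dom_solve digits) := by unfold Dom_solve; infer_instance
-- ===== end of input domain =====

-- B replaces A's consecutive-delta pass by a divide-and-conquer on the nesting structure
-- driven by an explicit work stack (objective: alternative, not claimed faster).

-- ===== PORT A =====
-- one loop step of A: emit '('s or ')'s for the transition (prev_d, d), then str(d)
def solveStepA (acc : List Char) (pd : Int × Int) : List Char :=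
  let s :=
    if pd.1 < pd.2 then
      (PySem.List.pyRange pd.1 pd.2 1).foldl (fun s _ => s ++ ['(']) acc
    else
      (PySem.List.pyRange pd.2 pd.1 1).foldl (fun s _ => s ++ [')']) acc
  s ++ PySem.Int.toChars pd.2

def solve (digits : List Int) : String :=
  let str_res := (List.zip ((0 : Int) :: digits) (digits ++ [0])).foldl solveStepA []
  String.ofList (PySem.List.slice str_res none (some (-1)))   -- str_res[:-1]

-- ===== PORT B =====
-- a work-stack item: a finished string piece, or a (sublist, depth) frame still to render
inductive WItem where
  | piece : List Char → WItem
  | frame : List Int → Int → WItem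

-- measure of one item, for termination of the stack loop
def wMeasure : WItem → Nat
  | .piece _ => 0
  | .frame ds depth => 2 * (ds.map (fun x => (x - depth).natAbs)).sum + ds.length + 1

-- helper for the termination argument: moving one level towards a run's digits
theorem sum_shift_le {f g : Int → Nat} (l : List Int) (h : ∀ x ∈ l, f x + 1 ≤ g x) :
    (l.map f).sum + l.length ≤ (l.map g).sum := by
  induction l with
  | nil => simp
  | cons a t ih =>
      have ha := h a (by simp)
      have ht := ih (fun x hx => h x (by simp [hx]))
      simp only [List.map_cons, List.sum_cons, List.length_cons]
      omega

theorem frame_split_lt (d : Int) (rest : List Int) (depth : Int) (p : Int → Bool)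
    (hd : p d = true) (lvl : Int)
    (hlvl : ∀ x ∈ (d :: rest).takeWhile p, (x - lvl).natAbs + 1 ≤ (x - depth).natAbs) :
    wMeasure (.frame ((d :: rest).takeWhile p) lvl) + wMeasure (.frame ((d :: rest).dropWhile p) depth)
      < wMeasure (.frame (d :: rest) depth) := by
  have hsplit := List.takeWhile_append_dropWhile (p := p) (l := d :: rest)
  have hlen : ((d :: rest).takeWhile p).length + ((d :: rest).dropWhile p).length = (d :: rest).length := by
    rw [← List.length_append, hsplit]
  have hsum : (((d :: rest).takeWhile p).map (fun x => (x - depth).natAbs)).sum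
      + (((d :: rest).dropWhile p).map (fun x => (x - depth).natAbs)).sum
      = ((d :: rest).map (fun x => (x - depth).natAbs)).sum := by
    rw [← List.sum_append, ← List.map_append, hsplit]
  have htk : (((d :: rest).takeWhile p).map (fun x => (x - lvl).natAbs)).sum
      + ((d :: rest).takeWhile p).length
      ≤ (((d :: rest).takeWhile p).map (fun x => (x - depth).natAbs)).sum :=
    sum_shift_le _ hlvl
  have hne : ((d :: rest).takeWhile p).length ≥ 1 := by
    rw [List.takeWhile_cons_of_pos hd]; simp
  simp only [wMeasure]
  omega

-- the stack loop of B: pop a piece → emit it; pop a frame → consume one equal digit,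
-- or split off the maximal run above (below) the depth and push its subproblems
def loopB (out : List (List Char)) (work : List WItem) : List (List Char) :=
  match work with
  | [] => out
  | .piece s :: w => loopB (out ++ [s]) w
  | .frame [] _ :: w => loopB out w
  | .frame (d :: rest) depth :: w =>
    if d = depth then
      loopB out (.piece (PySem.Int.toChars depth) :: .frame rest depth :: w)
    else if depth < d then
      loopB out (.piece ['('] ::
        .frame ((d :: rest).takeWhile (fun x => decide (depth < x))) (depth + 1) ::
        .piece [')'] ::
        .frame ((d :: rest).dropWhile (fun x => decide (depth < x))) depth :: w)
    else
      loopB out (.piece [')'] ::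
        .frame ((d :: rest).takeWhile (fun x => decide (x < depth))) (depth - 1) ::
        .piece ['('] ::
        .frame ((d :: rest).dropWhile (fun x => decide (x < depth))) depth :: w)
termination_by ((work.map wMeasure).sum, work.length)
decreasing_by
  · simp only [Prod.lex_def, List.map_cons, List.sum_cons, List.length_cons, wMeasure]
    omega
  · simp only [Prod.lex_def, List.map_cons, List.sum_cons, List.length_cons, wMeasure,
      List.map_nil, List.sum_nil, List.length_nil]
    omega
  · rename_i hd
    subst hd
    simp only [Prod.lex_def, List.map_cons, List.sum_cons, List.length_cons, wMeasure,
      Int.sub_self, Int.natAbs_zero]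
    omega
  · rename_i hne hlt
    have h := frame_split_lt d rest depth (fun x => decide (depth < x))
      (by simpa) (depth + 1)
      (fun x hx => by
        have := List.mem_takeWhile_imp hx
        simp at this
        omega)
    simp only [Prod.lex_def, List.map_cons, List.sum_cons, List.length_cons, wMeasure] at h ⊢
    omega
  · rename_i hne hnlt
    have h := frame_split_lt d rest depth (fun x => decide (x < depth))
      (by simp only [decide_eq_true_eq]; omega) (depth - 1)
      (fun x hx => by
        have := List.mem_takeWhile_imp hx
        simp at this
        omega)
    simp only [Prod.lex_def, List.map_cons, List.sum_cons, List.length_cons, wMeasure] at h ⊢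
    omega

def solve_alt (digits : List Int) : String :=
  String.ofList ((loopB [] [.frame digits 0]).flatten)   -- "".join(out)

-- ===== PRECONDITION & SPEC =====
def Spec_solve (digits : List Int) (out : String) : Prop := out = solve_alt digits
instance (digits : List Int) (out : String) : Decidable (Spec_solve digits out) := by unfold Spec_solve; infer_instance

-- ===== CLAIM (what is proved, stated in full; the proofs are below) =====
def Claim_equal_solve : Prop := ∀ (digits : List Int), Dom_solve digits → Spec_solve digits (solve digits)

-- ===== LEMMAS AND PROOFS =====

-- proof-side helper: the parentheses emitted when moving from value a to value b
def transP (a b : Int) : List Char :=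
  if a < b then List.replicate (b - a).toNat '(' else List.replicate (a - b).toNat ')'

-- proof-side spec of the rendered text at reference level `depth`, coming from value `cur`:
-- transitions interleaved with digits, closed back to `depth` at the end
def G (depth : Int) : Int → List Int → List Char
  | cur, [] => transP cur depth
  | cur, d :: r => transP cur d ++ PySem.Int.toChars d ++ G depth d r

-- one step of A's fold equals the transition followed by the digit
theorem stepA_eq (acc : List Char) (p d : Int) :
    solveStepA acc (p, d) = acc ++ transP p d ++ PySem.Int.toChars d := by
  unfold solveStepA transP
  by_cases h : p < d
  · simp [h, PySem.List.length_pyRange_one]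
  · simp [h, PySem.List.length_pyRange_one]

-- A's fold over the sentinel zip is the spec text (closed to 0) plus the trailing '0'
theorem foldA_eq (ds : List Int) (cur : Int) (acc : List Char) :
    (List.zip (cur :: ds) (ds ++ [0])).foldl solveStepA acc
      = acc ++ G 0 cur ds ++ ['0'] := by
  induction ds generalizing cur acc with
  | nil =>
      show solveStepA acc (cur, 0) = _
      rw [stepA_eq]
      rfl
  | cons d rest ih =>
      show (List.zip (d :: rest) (rest ++ [0])).foldl solveStepA (solveStepA acc (cur, d)) = _
      rw [ih, stepA_eq, G]
      simp [List.append_assoc]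

-- transP as a pure replicate, on each side
theorem transP_open (a b : Int) (h : a ≤ b) : transP a b = List.replicate (b - a).toNat '(' := by
  unfold transP
  by_cases hab : a < b
  · rw [if_pos hab]
  · have : b = a := by omega
    subst this
    simp

theorem transP_close (a b : Int) (h : b ≤ a) : transP a b = List.replicate (a - b).toNat ')' := by
  unfold transP
  rw [if_neg (by omega)]

-- a closing transition across level `depth` splits at that level
theorem transP_close_split (cur depth d' : Int) (h1 : depth < cur) (h2 : d' ≤ depth) :
    transP cur d' = transP cur (depth + 1) ++ ')' :: transP depth d' := by
  rw [transP_close cur d' (by omega), transP_close cur (depth + 1) (by omega),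
    transP_close depth d' (by omega),
    show (cur - d').toNat = (cur - (depth + 1)).toNat + (1 + (depth - d').toNat) from by omega,
    List.replicate_add, List.replicate_add]
  simp

-- an opening transition across level `depth` splits at that level
theorem transP_open_split (cur depth d' : Int) (h1 : cur < depth) (h2 : depth ≤ d') :
    transP cur d' = transP cur (depth - 1) ++ '(' :: transP depth d' := by
  rw [transP_open cur d' (by omega), transP_open cur (depth - 1) (by omega),
    transP_open depth d' (by omega),
    show (d' - cur).toNat = ((depth - 1) - cur).toNat + (1 + (d' - depth)).toNat from by omega,
    show ((1 + (d' - depth)).toNat) = 1 + (d' - depth).toNat from by omega,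
    List.replicate_add, List.replicate_add]
  simp

-- peeling one paren off a transition
theorem transP_open_succ (depth d : Int) (h : depth < d) :
    transP depth d = '(' :: transP (depth + 1) d := by
  rw [transP_open depth d (by omega), transP_open (depth + 1) d (by omega),
    show (d - depth).toNat = (d - (depth + 1)).toNat + 1 from by omega, List.replicate_succ]

theorem transP_close_succ (depth d : Int) (h : d < depth) :
    transP depth d = ')' :: transP (depth - 1) d := by
  rw [transP_close depth d (by omega), transP_close (depth - 1) d (by omega),
    show (depth - d).toNat = (depth - (d + 1)).toNat + 1 from by omega]
  rw [List.replicate_succ]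
  congr 2
  omega

-- ascending general lemma: inside a run strictly above `depth`, the text at level `depth`
-- is the text at level `depth+1` followed by one extra ')' and the remainder
theorem G_ascend (run : List Int) (rest : List Int) (cur depth : Int)
    (hcur : depth < cur) (hrun : ∀ x ∈ run, depth < x)
    (hrest : ∀ d', rest.head? = some d' → d' ≤ depth) :
    G depth cur (run ++ rest) = G (depth + 1) cur run ++ ')' :: G depth depth rest := by
  induction run generalizing cur with
  | nil =>
      cases rest with
      | nil =>
          show transP cur depth = transP cur (depth + 1) ++ ')' :: transP depth depth
          exact transP_close_split cur depth depth hcur (by omega)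
      | cons d' r' =>
          have hd' : d' ≤ depth := hrest d' (by simp)
          show transP cur d' ++ PySem.Int.toChars d' ++ G depth d' r'
              = transP cur (depth + 1) ++ ')' :: (transP depth d' ++ PySem.Int.toChars d' ++ G depth d' r')
          rw [transP_close_split cur depth d' hcur hd']
          simp [List.append_assoc]
  | cons a run' ih =>
      have ha : depth < a := hrun a (by simp)
      show transP cur a ++ PySem.Int.toChars a ++ G depth a (run' ++ rest)
          = (transP cur a ++ PySem.Int.toChars a ++ G (depth + 1) a run') ++ ')' :: G depth depth rest
      rw [ih a ha (fun x hx => hrun x (by simp [hx]))]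
      simp [List.append_assoc]

-- descending general lemma (mirror image)
theorem G_descend (run : List Int) (rest : List Int) (cur depth : Int)
    (hcur : cur < depth) (hrun : ∀ x ∈ run, x < depth)
    (hrest : ∀ d', rest.head? = some d' → depth ≤ d') :
    G depth cur (run ++ rest) = G (depth - 1) cur run ++ '(' :: G depth depth rest := by
  induction run generalizing cur with
  | nil =>
      cases rest with
      | nil =>
          show transP cur depth = transP cur (depth - 1) ++ '(' :: transP depth depth
          exact transP_open_split cur depth depth hcur (by omega)
      | cons d' r' =>
          have hd' : depth ≤ d' := hrest d' (by simp)
          show transP cur d' ++ PySem.Int.toChars d' ++ G depth d' r'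
              = transP cur (depth - 1) ++ '(' :: (transP depth d' ++ PySem.Int.toChars d' ++ G depth d' r')
          rw [transP_open_split cur depth d' hcur hd']
          simp [List.append_assoc]
  | cons a run' ih =>
      have ha : a < depth := hrun a (by simp)
      show transP cur a ++ PySem.Int.toChars a ++ G depth a (run' ++ rest)
          = (transP cur a ++ PySem.Int.toChars a ++ G (depth - 1) a run') ++ '(' :: G depth depth rest
      rw [ih a ha (fun x hx => hrun x (by simp [hx]))]
      simp [List.append_assoc]

-- wrapper: a nonempty run above `depth` is one parenthesized group one level deeper
theorem G_group_up (d : Int) (run' rest : List Int) (depth : Int)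
    (hd : depth < d) (hrun : ∀ x ∈ run', depth < x)
    (hrest : ∀ d', rest.head? = some d' → d' ≤ depth) :
    G depth depth ((d :: run') ++ rest)
      = '(' :: G (depth + 1) (depth + 1) (d :: run') ++ ')' :: G depth depth rest := by
  show transP depth d ++ PySem.Int.toChars d ++ G depth d (run' ++ rest) = _
  rw [G_ascend run' rest d depth hd hrun hrest]
  show transP depth d ++ PySem.Int.toChars d ++ (G (depth + 1) d run' ++ ')' :: G depth depth rest)
      = '(' :: (transP (depth + 1) d ++ PySem.Int.toChars d ++ G (depth + 1) d run') ++ ')' :: G depth depth rest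
  rw [transP_open_succ depth d hd]
  simp [List.append_assoc]

-- wrapper: a nonempty run below `depth` is one ")…(" group one level shallower
theorem G_group_down (d : Int) (run' rest : List Int) (depth : Int)
    (hd : d < depth) (hrun : ∀ x ∈ run', x < depth)
    (hrest : ∀ d', rest.head? = some d' → depth ≤ d') :
    G depth depth ((d :: run') ++ rest)
      = ')' :: G (depth - 1) (depth - 1) (d :: run') ++ '(' :: G depth depth rest := by
  show transP depth d ++ PySem.Int.toChars d ++ G depth d (run' ++ rest) = _
  rw [G_descend run' rest d depth hd hrun hrest]
  show transP depth d ++ PySem.Int.toChars d ++ (G (depth - 1) d run' ++ '(' :: G depth depth rest)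
      = ')' :: (transP (depth - 1) d ++ PySem.Int.toChars d ++ G (depth - 1) d run') ++ '(' :: G depth depth rest
  rw [transP_close_succ depth d hd]
  simp [List.append_assoc]

-- denotation of one work item: the text it will eventually contribute
def denoteW : WItem → List Char
  | .piece s => s
  | .frame ds depth => G depth depth ds

-- the stack loop realizes the denotation of its work stack, in order
theorem loopB_eq (out : List (List Char)) (work : List WItem) :
    (loopB out work).flatten = out.flatten ++ (work.map denoteW).flatten := by
  induction out, work using loopB.induct with
  | case1 out => simp [loopB]
  | case2 out s w ih => simp [loopB, ih, denoteW, List.append_assoc]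
  | case3 out depth w ih =>
      simp [loopB, ih, denoteW, G, transP]
  | case4 out rest depth w ih =>
      rw [loopB, if_pos rfl, ih]
      simp only [List.map_cons, List.flatten_cons, denoteW]
      have : G depth depth (depth :: rest) = PySem.Int.toChars depth ++ G depth depth rest := by
        show transP depth depth ++ PySem.Int.toChars depth ++ G depth depth rest = _
        unfold transP
        simp
      rw [this]
      simp [List.append_assoc]
  | case5 out d rest depth w hd hlt ih =>
      rw [loopB, if_neg hd, if_pos hlt, ih]
      simp only [List.map_cons, List.flatten_cons, denoteW]
      have hsplit := List.takeWhile_append_dropWhile (p := fun x => decide (depth < x)) (l := d :: rest)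
      have htw : (d :: rest).takeWhile (fun x => decide (depth < x))
          = d :: (rest.takeWhile (fun x => decide (depth < x))) :=
        List.takeWhile_cons_of_pos (by simpa)
      have hG : G depth depth (d :: rest)
          = '(' :: G (depth + 1) (depth + 1) ((d :: rest).takeWhile (fun x => decide (depth < x)))
            ++ ')' :: G depth depth ((d :: rest).dropWhile (fun x => decide (depth < x))) := by
        conv_lhs => rw [← hsplit]
        rw [htw]
        refine G_group_up d _ _ depth hlt ?_ ?_
        · intro x hx
          have := List.mem_takeWhile_imp (l := rest) (p := fun x => decide (depth < x)) hx
          simpa using this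
        · intro d' hd'
          have := List.head?_dropWhile_not (fun x => decide (depth < x)) (d :: rest)
          rw [hd'] at this
          simp at this
          omega
      rw [hG]
      simp [List.append_assoc]
  | case6 out d rest depth w hd hlt ih =>
      rw [loopB, if_neg hd, if_neg hlt, ih]
      simp only [List.map_cons, List.flatten_cons, denoteW]
      have hdlt : d < depth := by omega
      have hsplit := List.takeWhile_append_dropWhile (p := fun x => decide (x < depth)) (l := d :: rest)
      have htw : (d :: rest).takeWhile (fun x => decide (x < depth))
          = d :: (rest.takeWhile (fun x => decide (x < depth))) :=
        List.takeWhile_cons_of_pos (by simpa)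
      have hG : G depth depth (d :: rest)
          = ')' :: G (depth - 1) (depth - 1) ((d :: rest).takeWhile (fun x => decide (x < depth)))
            ++ '(' :: G depth depth ((d :: rest).dropWhile (fun x => decide (x < depth))) := by
        conv_lhs => rw [← hsplit]
        rw [htw]
        refine G_group_down d _ _ depth hdlt ?_ ?_
        · intro x hx
          have := List.mem_takeWhile_imp (l := rest) (p := fun x => decide (x < depth)) hx
          simpa using this
        · intro d' hd'
          have := List.head?_dropWhile_not (fun x => decide (x < depth)) (d :: rest)
          rw [hd'] at this
          simp at this
          omega
      rw [hG]
      simp [List.append_assoc]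

-- ===== VERDICT (by name: the statement is the Claim_ definition above) =====
theorem solve_spec : Claim_equal_solve := by
  intro digits _
  unfold Spec_solve
  unfold solve solve_alt
  rw [foldA_eq, loopB_eq]
  simp [denoteW, PySem.List.slice_to_neg_one]
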